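-- pv_equiv track=rewrite | github.com/cactus-compute/fmtp | nanochat/medusa_buffers.py | get_default_medusa_choices
-- ===== SOURCE A (Python) =====
-- from typing import List, Tuple, Dict, Optional
--
-- def get_default_medusa_choices(num_heads: int, topk: int = 10) -> List[Tuple[int, ...]]:
--     """
--     Generate default tree configuration based on number of Medusa heads.
--
--     Creates a balanced tree that trades off between:
--     - Coverage: more candidates = higher chance of accepting longer sequences
--     - Overhead: more candidates = larger tree attention computation
--
--     Args:
--         num_heads: Number of Medusa prediction heads
--         topk: Maximum top-k predictions to consider from each head
--
--     Returns:
--         List of choice tuples defining the tree structure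
--
--     Example:
--         >>> choices = get_default_medusa_choices(4, topk=10)
--         >>> len(choices)  # Number of tree nodes (excluding root)
--         63
--     """
--     choices = []
--
--     if num_heads >= 1:
--         # Single-level: top predictions from head 0
--         for i in range(min(topk, 10)):
--             choices.append((i,))
--
--     if num_heads >= 2:
--         # Two-level paths
--         for i in range(min(topk, 5)):
--             for j in range(min(topk, 5)):
--                 choices.append((i, j))
--
--     if num_heads >= 3:
--         # Three-level paths (more selective to limit tree size)
--         for i in range(min(topk, 3)):
--             for j in range(min(topk, 3)):
--                 for k in range(min(topk, 3)):
--                     choices.append((i, j, k))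
--
--     if num_heads >= 4:
--         # Four-level paths (very selective)
--         for i in range(min(topk, 2)):
--             for j in range(min(topk, 2)):
--                 for k in range(min(topk, 2)):
--                     for l in range(min(topk, 2)):
--                         choices.append((i, j, k, l))
--
--     return choices
-- ===== SOURCE B (Python) =====
-- def get_default_medusa_choices(num_heads: int, topk: int = 10):
--     # Enumerate each level's tuples by counting 0..b**level-1 and decoding
--     # each counter into its base-b digits (most significant first).
--     caps = [10, 5, 3, 2]
--     choices = []
--     for level in range(1, min(num_heads, 4) + 1):
--         b = min(topk, caps[level - 1])
--         if b <= 0: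
--             continue
--         for n in range(b ** level):
--             digits = []
--             for _ in range(level):
--                 n, d = divmod(n, b)
--                 digits.append(d)
--             choices.append(tuple(reversed(digits)))
--     return choices
-- ===== Notes on version B (the rewrite author's own statement) =====
-- stated objective: alternative
-- what changed: Replaces A's four hardcoded guarded nested-loop blocks by a single loop over the levels that counts n = 0 .. b**level - 1 and arithmetically decodes each counter into its base-b digits via repeated divmod, instead of enumerating tuples with nested loops.
import Mathlib
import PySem

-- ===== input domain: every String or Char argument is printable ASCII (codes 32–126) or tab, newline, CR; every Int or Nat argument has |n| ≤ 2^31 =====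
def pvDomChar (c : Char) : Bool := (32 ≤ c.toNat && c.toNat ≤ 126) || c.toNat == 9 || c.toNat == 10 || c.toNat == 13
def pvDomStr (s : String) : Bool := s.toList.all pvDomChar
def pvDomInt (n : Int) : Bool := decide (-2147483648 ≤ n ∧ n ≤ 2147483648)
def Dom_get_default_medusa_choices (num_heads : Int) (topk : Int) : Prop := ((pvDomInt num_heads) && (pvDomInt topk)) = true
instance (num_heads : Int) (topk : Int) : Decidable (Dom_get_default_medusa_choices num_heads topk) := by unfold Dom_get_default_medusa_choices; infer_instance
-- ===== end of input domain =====

-- B replaces A's four hardcoded guarded nested-loop blocks by a single loop over the levels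
-- that counts n = 0 .. b**level - 1 and decodes each counter into its base-b digits
-- (arithmetic decoding instead of nested loops); objective: alternative. Equal on all inputs.

-- ===== PORT A =====
def get_default_medusa_choices (num_heads : Int) (topk : Int) : List (List Int) :=
  let choices : List (List Int) := []
  let choices := if num_heads ≥ 1 then
      (PySem.List.pyRange 0 (min topk 10) 1).foldl (fun acc i => acc ++ [[i]]) choices
    else choices
  let choices := if num_heads ≥ 2 then
      (PySem.List.pyRange 0 (min topk 5) 1).foldl (fun acc i =>
        (PySem.List.pyRange 0 (min topk 5) 1).foldl (fun acc j => acc ++ [[i, j]]) acc) choices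
    else choices
  let choices := if num_heads ≥ 3 then
      (PySem.List.pyRange 0 (min topk 3) 1).foldl (fun acc i =>
        (PySem.List.pyRange 0 (min topk 3) 1).foldl (fun acc j =>
          (PySem.List.pyRange 0 (min topk 3) 1).foldl (fun acc k => acc ++ [[i, j, k]]) acc) acc) choices
    else choices
  let choices := if num_heads ≥ 4 then
      (PySem.List.pyRange 0 (min topk 2) 1).foldl (fun acc i =>
        (PySem.List.pyRange 0 (min topk 2) 1).foldl (fun acc j =>
          (PySem.List.pyRange 0 (min topk 2) 1).foldl (fun acc k =>
            (PySem.List.pyRange 0 (min topk 2) 1).foldl (fun acc l => acc ++ [[i, j, k, l]]) acc) acc) acc) choices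
    else choices
  choices

-- ===== PORT B =====
-- the inner 'for _ in range(level): n, d = divmod(n, b); digits.append(d)' loop of Source B:
-- the list of the 'level' base-b digits of n, least significant first
def pvDigitsRev (b : Int) : Nat → Int → List Int
  | 0, _ => []
  | k + 1, n => PySem.Int.mod n b :: pvDigitsRev b k (PySem.Int.floordiv n b)

def get_default_medusa_choices_alt (num_heads : Int) (topk : Int) : List (List Int) :=
  let caps : List Int := [10, 5, 3, 2]
  (PySem.List.pyRange 1 (min num_heads 4 + 1) 1).foldl
    (fun choices level =>
      let b := min topk (PySem.List.pyGetD caps (level - 1) 0)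
      if b ≤ 0 then choices
      else choices ++ (PySem.List.pyRange 0 (b ^ level.toNat) 1).map
            (fun n => (pvDigitsRev b level.toNat n).reverse))
    []

-- ===== PRECONDITION & SPEC =====
def Spec_get_default_medusa_choices (num_heads : Int) (topk : Int) (out : List (List Int)) : Prop := out = get_default_medusa_choices_alt num_heads topk
instance (num_heads : Int) (topk : Int) (out : List (List Int)) : Decidable (Spec_get_default_medusa_choices num_heads topk out) := by unfold Spec_get_default_medusa_choices; infer_instance

-- ===== CLAIM (what is proved, stated in full; the proofs are below) =====
def Claim_equal_get_default_medusa_choices : Prop := ∀ (num_heads : Int) (topk : Int), Dom_get_default_medusa_choices num_heads topk → Spec_get_default_medusa_choices num_heads topk (get_default_medusa_choices num_heads topk)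

-- ===== LEMMAS AND PROOFS =====

-- common spec of one level's block: the b-ary tuples of length k, lexicographic
def pvProd (b : Int) : Nat → List (List Int)
  | 0 => [[]]
  | n + 1 => (PySem.List.pyRange 0 b 1).flatMap (fun i => (pvProd b n).map (fun t => i :: t))

theorem pvBlock1 (b : Int) (acc : List (List Int)) :
    (PySem.List.pyRange 0 b 1).foldl (fun acc i => acc ++ [[i]]) acc = acc ++ pvProd b 1 := by
  simp [pvProd, List.flatMap]

theorem pvBlock2 (b : Int) (acc : List (List Int)) :
    (PySem.List.pyRange 0 b 1).foldl (fun acc i =>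
      (PySem.List.pyRange 0 b 1).foldl (fun acc j => acc ++ [[i, j]]) acc) acc
    = acc ++ pvProd b 2 := by
  simp [pvProd, List.flatMap, List.map_map, Function.comp_def]

theorem pvBlock3 (b : Int) (acc : List (List Int)) :
    (PySem.List.pyRange 0 b 1).foldl (fun acc i =>
      (PySem.List.pyRange 0 b 1).foldl (fun acc j =>
        (PySem.List.pyRange 0 b 1).foldl (fun acc k => acc ++ [[i, j, k]]) acc) acc) acc
    = acc ++ pvProd b 3 := by
  simp [pvProd, List.flatMap, List.map_map, Function.comp_def]

theorem pvBlock4 (b : Int) (acc : List (List Int)) :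
    (PySem.List.pyRange 0 b 1).foldl (fun acc i =>
      (PySem.List.pyRange 0 b 1).foldl (fun acc j =>
        (PySem.List.pyRange 0 b 1).foldl (fun acc k =>
          (PySem.List.pyRange 0 b 1).foldl (fun acc l => acc ++ [[i, j, k, l]]) acc) acc) acc) acc
    = acc ++ pvProd b 4 := by
  simp [pvProd, List.flatMap, List.map_map, Function.comp_def]

-- decoding i * b^k + m (0 ≤ i < b, 0 ≤ m < b^k) into k+1 digits: i is the top digit
theorem pvDigits_split (b : Int) (hb : 1 ≤ b) : ∀ (k : Nat) (i m : Int), 0 ≤ i → i < b → 0 ≤ m → m < b ^ k →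
    pvDigitsRev b (k + 1) (i * b ^ k + m) = pvDigitsRev b k m ++ [i] := by
  intro k
  induction k with
  | zero =>
    intro i m hi hib hm hmlt
    have hm0 : m = 0 := by
      have : m < 1 := by simpa using hmlt
      omega
    subst hm0
    have h1 : i * b ^ 0 + 0 = i := by ring
    simp only [pvDigitsRev, h1, PySem.Int.mod_eq_emod_of_pos (by omega : (0:Int) < b),
      Int.emod_eq_of_lt hi hib, List.nil_append]
  | succ k ih =>
    intro i m hi hib hm hmlt
    have hb0 : (0:Int) < b := by omega
    have hbk : (0:Int) < b ^ k := pow_pos hb0 k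
    have hrw : i * b ^ (k + 1) + m = m + (i * b ^ k) * b := by ring
    have hmod : PySem.Int.mod (i * b ^ (k + 1) + m) b = PySem.Int.mod m b := by
      simp only [PySem.Int.mod_eq_emod_of_pos hb0]
      rw [show i * b ^ (k + 1) + m = m + b * (i * b ^ k) from by ring,
        Int.add_mul_emod_self_left]
    have hdiv : PySem.Int.floordiv (i * b ^ (k + 1) + m) b = i * b ^ k + m / b := by
      rw [PySem.Int.floordiv_eq_ediv_of_pos hb0, hrw,
        Int.add_mul_ediv_right _ _ (by omega : b ≠ 0)]
      ring
    have hq0 : 0 ≤ m / b := Int.ediv_nonneg hm (by omega)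
    have hqlt : m / b < b ^ k := by
      rw [Int.ediv_lt_iff_lt_mul hb0]
      calc m < b ^ (k + 1) := hmlt
        _ = b ^ k * b := by ring
    have := ih i (m / b) hi hib hq0 hqlt
    show PySem.Int.mod (i * b ^ (k + 1) + m) b ::
        pvDigitsRev b (k + 1) (PySem.Int.floordiv (i * b ^ (k + 1) + m) b) = _
    rw [hmod, hdiv, this]
    show _ = (PySem.Int.mod m b :: pvDigitsRev b k (PySem.Int.floordiv m b)) ++ [i]
    rw [PySem.Int.mod_eq_emod_of_pos hb0, PySem.Int.floordiv_eq_ediv_of_pos hb0]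
    simp

-- counting 0 .. c*B-1 splits into c blocks of size B
theorem pvRange_mul (c B : Nat) :
    List.range (c * B) = (List.range c).flatMap (fun i => (List.range B).map (fun m => i * B + m)) := by
  induction c with
  | zero => simp
  | succ c ih =>
    rw [Nat.succ_mul, List.range_add, ih, List.range_succ]
    simp

-- decoding all counters of level k yields exactly the lexicographic b-ary tuples
theorem pvDecode_eq_prod (N : Nat) (hN : 1 ≤ N) : ∀ k : Nat,
    (List.range (N ^ k)).map (fun m : Nat => (pvDigitsRev (N : Int) k (m : Int)).reverse)
      = pvProd (N : Int) k := by
  intro k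
  induction k with
  | zero => simp [pvDigitsRev, pvProd]
  | succ k ih =>
    have hb : (1:Int) ≤ (N : Int) := by exact_mod_cast hN
    rw [show N ^ (k + 1) = N * N ^ k from by ring, pvRange_mul N (N ^ k), List.map_flatMap]
    have hstep : ∀ i ∈ List.range N,
        ((List.range (N ^ k)).map (fun m => i * N ^ k + m)).map
            (fun m : Nat => (pvDigitsRev (N : Int) (k + 1) (m : Int)).reverse)
          = (pvProd (N : Int) k).map (fun t => ((i : Int)) :: t) := by
      intro i hi
      rw [List.map_map, ← ih, List.map_map]
      apply List.map_congr_left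
      intro m hm
      have him : (i : Int) < (N : Int) := by exact_mod_cast List.mem_range.mp hi
      have hmm : (m : Int) < (N : Int) ^ k := by
        have := List.mem_range.mp hm
        exact_mod_cast this
      have := pvDigits_split (N : Int) hb k (i : Int) (m : Int)
        (Int.natCast_nonneg i) him (Int.natCast_nonneg m) hmm
      simp only [Function.comp_apply]
      rw [show ((i * N ^ k + m : Nat) : Int) = (i : Int) * (N : Int) ^ k + (m : Int) by push_cast; ring,
        this]
      simp
    rw [List.flatMap_congr hstep]
    show _ = pvProd (N : Int) (k + 1)
    simp only [pvProd, PySem.List.pyRange_zero_natCast, List.flatMap_map]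

-- one B-level block equals acc ++ pvProd
theorem pvBlockB (b : Int) (k : Nat) (hk : 1 ≤ k) (acc : List (List Int)) :
    (if b ≤ 0 then acc
     else acc ++ (PySem.List.pyRange 0 (b ^ k) 1).map (fun n => (pvDigitsRev b k n).reverse))
    = acc ++ pvProd b k := by
  by_cases hb : b ≤ 0
  · obtain ⟨j, rfl⟩ : ∃ j, k = j + 1 := ⟨k - 1, by omega⟩
    rw [if_pos hb]
    have : PySem.List.pyRange 0 b 1 = [] := PySem.List.pyRange_one_eq_nil hb
    simp [pvProd, this]
  · rw [if_neg hb]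
    have hb1 : 1 ≤ b := by omega
    obtain ⟨N, rfl⟩ : ∃ N : Nat, b = (N : Int) := ⟨b.toNat, (Int.toNat_of_nonneg (by omega)).symm⟩
    have hN : 1 ≤ N := by exact_mod_cast hb1
    rw [show ((N : Int)) ^ k = ((N ^ k : Nat) : Int) by push_cast; ring,
      PySem.List.pyRange_zero_natCast, List.map_map]
    rw [show ((fun n => (pvDigitsRev (N : Int) k n).reverse) ∘ fun m : Nat => (m : Int))
        = fun m : Nat => (pvDigitsRev (N : Int) k (m : Int)).reverse from rfl]
    rw [pvDecode_eq_prod N hN k]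

-- ===== VERDICT (by name: the statement is the Claim_ definition above) =====
theorem get_default_medusa_choices_spec : Claim_equal_get_default_medusa_choices := by
  intro nh tk _
  unfold Spec_get_default_medusa_choices get_default_medusa_choices get_default_medusa_choices_alt
  by_cases h1 : nh < 1
  · rw [PySem.List.pyRange_one_eq_nil (by omega : min nh 4 + 1 ≤ 1)]
    simp only [List.foldl]
    rw [if_neg (by omega), if_neg (by omega), if_neg (by omega), if_neg (by omega)]
  · by_cases h2 : nh < 2
    · rw [show min nh 4 + 1 = 2 by omega,
        show PySem.List.pyRange 1 2 1 = [1] from by decide]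
      simp only [List.foldl]
      rw [show PySem.List.pyGetD ([10, 5, 3, 2] : List Int) ((1:Int) - 1) 0 = 10 from by decide,
        show ((1:Int)).toNat = 1 from rfl]
      rw [pvBlockB (min tk 10) 1 le_rfl]
      rw [if_pos (by omega : nh ≥ 1), if_neg (by omega), if_neg (by omega), if_neg (by omega),
        pvBlock1]
    · by_cases h3 : nh < 3
      · rw [show min nh 4 + 1 = 3 by omega,
          show PySem.List.pyRange 1 3 1 = [1, 2] from by decide]
        simp only [List.foldl]
        rw [show PySem.List.pyGetD ([10, 5, 3, 2] : List Int) ((1:Int) - 1) 0 = 10 from by decide,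
          show PySem.List.pyGetD ([10, 5, 3, 2] : List Int) ((2:Int) - 1) 0 = 5 from by decide,
          show ((1:Int)).toNat = 1 from rfl, show ((2:Int)).toNat = 2 from rfl]
        rw [pvBlockB (min tk 10) 1 le_rfl, pvBlockB (min tk 5) 2 (by omega)]
        rw [if_pos (by omega : nh ≥ 1), if_pos (by omega : nh ≥ 2), if_neg (by omega),
          if_neg (by omega), pvBlock1, pvBlock2]
      · by_cases h4 : nh < 4
        · rw [show min nh 4 + 1 = 4 by omega,
            show PySem.List.pyRange 1 4 1 = [1, 2, 3] from by decide]
          simp only [List.foldl]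
          rw [show PySem.List.pyGetD ([10, 5, 3, 2] : List Int) ((1:Int) - 1) 0 = 10 from by decide,
            show PySem.List.pyGetD ([10, 5, 3, 2] : List Int) ((2:Int) - 1) 0 = 5 from by decide,
            show PySem.List.pyGetD ([10, 5, 3, 2] : List Int) ((3:Int) - 1) 0 = 3 from by decide,
            show ((1:Int)).toNat = 1 from rfl, show ((2:Int)).toNat = 2 from rfl,
            show ((3:Int)).toNat = 3 from rfl]
          rw [pvBlockB (min tk 10) 1 le_rfl, pvBlockB (min tk 5) 2 (by omega),
            pvBlockB (min tk 3) 3 (by omega)]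
          rw [if_pos (by omega : nh ≥ 1), if_pos (by omega : nh ≥ 2), if_pos (by omega : nh ≥ 3),
            if_neg (by omega), pvBlock1, pvBlock2, pvBlock3]
        · rw [show min nh 4 + 1 = 5 by omega,
            show PySem.List.pyRange 1 5 1 = [1, 2, 3, 4] from by decide]
          simp only [List.foldl]
          rw [show PySem.List.pyGetD ([10, 5, 3, 2] : List Int) ((1:Int) - 1) 0 = 10 from by decide,
            show PySem.List.pyGetD ([10, 5, 3, 2] : List Int) ((2:Int) - 1) 0 = 5 from by decide,
            show PySem.List.pyGetD ([10, 5, 3, 2] : List Int) ((3:Int) - 1) 0 = 3 from by decide,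
            show PySem.List.pyGetD ([10, 5, 3, 2] : List Int) ((4:Int) - 1) 0 = 2 from by decide,
            show ((1:Int)).toNat = 1 from rfl, show ((2:Int)).toNat = 2 from rfl,
            show ((3:Int)).toNat = 3 from rfl, show ((4:Int)).toNat = 4 from rfl]
          rw [pvBlockB (min tk 10) 1 le_rfl, pvBlockB (min tk 5) 2 (by omega),
            pvBlockB (min tk 3) 3 (by omega), pvBlockB (min tk 2) 4 (by omega)]
          rw [if_pos (by omega : nh ≥ 1), if_pos (by omega : nh ≥ 2), if_pos (by omega : nh ≥ 3),
            if_pos (by omega : nh ≥ 4), pvBlock1, pvBlock2, pvBlock3, pvBlock4]
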